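-- pv_equiv track=rewrite | github.com/thomasdelaet/python-velbus | velbus/message.py | byte_to_channels
-- ===== SOURCE A (Python) =====
-- def byte_to_channels(byte):
--     """
--     :return: list(int)
--     """
--     # pylint: disable-msg=R0201
--     assert isinstance(byte, int)
--     assert byte >= 0
--     assert byte < 256
--     result = []
--     for offset in range(0, 8):
--         if byte & (1 << offset):
--             result.append(offset + 1)
--     return result
-- ===== SOURCE B (Python) =====
-- def byte_to_channels(byte):
--     """
--     :return: list(int)
--     """
--     assert isinstance(byte, int)
--     assert byte >= 0
--     assert byte < 256
--     result = []
--     while byte: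
--         low = byte & -byte
--         result.append(low.bit_length())
--         byte &= byte - 1
--     return result
-- ===== Notes on version B (the rewrite author's own statement) =====
-- stated objective: alternative
-- what changed: Replaced the fixed 8-iteration loop testing each bit with a while-loop over only the set bits: isolate the lowest set bit with byte & -byte, read its 1-based position via bit_length(), clear it with byte &= byte - 1.
import Mathlib
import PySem

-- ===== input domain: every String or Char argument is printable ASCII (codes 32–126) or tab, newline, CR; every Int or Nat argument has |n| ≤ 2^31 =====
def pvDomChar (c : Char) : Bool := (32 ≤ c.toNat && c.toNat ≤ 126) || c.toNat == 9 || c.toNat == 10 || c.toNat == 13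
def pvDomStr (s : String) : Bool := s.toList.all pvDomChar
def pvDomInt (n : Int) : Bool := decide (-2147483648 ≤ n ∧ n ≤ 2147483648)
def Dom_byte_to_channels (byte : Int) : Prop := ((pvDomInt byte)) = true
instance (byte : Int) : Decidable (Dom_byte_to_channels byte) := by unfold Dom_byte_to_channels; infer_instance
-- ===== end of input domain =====

-- B replaces A's fixed 8-iteration bit test with a while-loop over only the set bits
-- (isolate lowest set bit, take its bit_length, clear it); objective: alternative decomposition.


-- ===== PORT A =====
-- for offset in range(0, 8): if byte & (1 << offset): result.append(offset + 1)
-- (offset is always ≥ 0, so '1 << offset' is exactly '1 <<< offset.toNat')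
def byte_to_channels (byte : Int) : List Int :=
  (PySem.List.pyRange 0 8 1).foldl
    (fun result offset =>
      if PySem.Int.band byte ((1 : Int) <<< offset.toNat) ≠ 0 then result ++ [offset + 1] else result)
    []

-- ===== PORT B =====
-- while byte: low = byte & -byte; result.append(low.bit_length()); byte &= byte - 1
-- fuel only makes the recursion total; under Pre_ (byte < 256) at most 8 iterations happen.
-- low.bit_length() is PySem.Int.bitLength low.
def pvAltLoop : Nat → Int → List Int
  | 0, _ => []
  | fuel + 1, byte =>
    if byte ≠ 0 then
      let low := PySem.Int.band byte (-byte)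
      ((PySem.Int.bitLength low : Nat) : Int) :: pvAltLoop fuel (PySem.Int.band byte (byte - 1))
    else []

def byte_to_channels_alt (byte : Int) : List Int := pvAltLoop 8 byte

-- ===== PRECONDITION & SPEC =====
-- A asserts 0 <= byte < 256 and raises AssertionError otherwise; Pre_ is exactly those asserts.
def Pre_byte_to_channels (byte : Int) : Prop := 0 ≤ byte ∧ byte < 256
instance (byte : Int) : Decidable (Pre_byte_to_channels byte) := by unfold Pre_byte_to_channels; infer_instance
def pvWitness_byte_to_channels : Int := (37)

def Spec_byte_to_channels (byte : Int) (out : List Int) : Prop := out = byte_to_channels_alt byte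
instance (byte : Int) (out : List Int) : Decidable (Spec_byte_to_channels byte out) := by unfold Spec_byte_to_channels; infer_instance

-- ===== CLAIM =====
def Claim_equal_byte_to_channels : Prop := ∀ (byte : Int), Dom_byte_to_channels byte → Pre_byte_to_channels byte → Spec_byte_to_channels byte (byte_to_channels byte)

-- ===== LEMMAS AND PROOFS =====

-- ===== VERDICT =====
theorem byte_to_channels_spec : Claim_equal_byte_to_channels := by
  intro byte _ hpre
  obtain ⟨h0, h1⟩ := hpre
  unfold Spec_byte_to_channels
  interval_cases byte <;> decide
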